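-- pv_equiv track=rewrite | github.com/pedroives-public/programming-challenges | solutions/shortest_subarray_to_be_removed_to_make_array_sorted.py | findLengthOfShortestSubarray
-- ===== SOURCE A (Python) =====
-- from typing import List
--
-- def findLengthOfShortestSubarray(arr: List[int]) -> int:
--     suffix = len(arr) - 1
--     while suffix > 0 and arr[suffix] >= arr[suffix-1]:
--         suffix -= 1
--
--     ans = suffix
--     prefix = 0
--
--     while prefix < suffix and (prefix == 0 or arr[prefix - 1] <= arr[prefix]):
--         while suffix < len(arr) and arr[prefix] > arr[suffix]:
--             suffix += 1
--
--         ans = min(ans, suffix - prefix - 1)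
--         prefix += 1
--
--     return ans
-- ===== SOURCE B (Python) =====
-- from typing import List
-- from bisect import bisect_left
--
-- def findLengthOfShortestSubarray(arr: List[int]) -> int:
--     n = len(arr)
--     if n == 0:
--         return 0
--     right = n - 1
--     while right > 0 and arr[right - 1] <= arr[right]:
--         right -= 1
--     if right == 0:
--         return 0
--     left = 0
--     while left + 1 < n and arr[left] <= arr[left + 1]:
--         left += 1
--     suffix = arr[right:]
--     ans = min(n - left - 1, right)
--     for i in range(left + 1):
--         j = right + bisect_left(suffix, arr[i])
--         ans = min(ans, j - i - 1)
--     return ans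
-- ===== Notes on version B (the rewrite author's own statement) =====
-- stated objective: alternative
-- what changed: B precomputes the sorted-prefix end and sorted-suffix start, then for each prefix element binary-searches (bisect_left) the sorted suffix for the first element >= it, instead of A's single monotone two-pointer sweep that interleaves the prefix-validity check with an advancing suffix pointer.
-- intended difference: On the empty list A returns -1 (its suffix pointer is initialised to len(arr)-1 = -1 and becomes the answer), while B returns 0, the intended value since removing nothing leaves an empty, hence sorted, array and a length cannot be negative. — e.g. on findLengthOfShortestSubarray([]): A returns -1, B returns 0
import Mathlib
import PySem

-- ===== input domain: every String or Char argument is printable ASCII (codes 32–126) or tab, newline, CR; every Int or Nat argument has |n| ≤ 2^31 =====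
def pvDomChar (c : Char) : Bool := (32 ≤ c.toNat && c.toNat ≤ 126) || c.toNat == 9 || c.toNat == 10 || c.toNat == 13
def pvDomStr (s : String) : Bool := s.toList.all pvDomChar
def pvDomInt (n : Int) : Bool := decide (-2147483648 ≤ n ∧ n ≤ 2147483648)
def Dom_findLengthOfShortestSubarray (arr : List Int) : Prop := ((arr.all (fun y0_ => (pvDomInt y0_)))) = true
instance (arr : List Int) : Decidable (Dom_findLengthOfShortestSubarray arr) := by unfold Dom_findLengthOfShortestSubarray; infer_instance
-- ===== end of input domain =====

-- B differs from A only on the empty list (A returns -1 there, B returns 0); everywhere else the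
-- two are proved to return the same value.  B is an alternative algorithm of similar cost.

-- ===== PORT A =====
-- Every index A reads is guarded in range by its while-conditions, so `arr[i]` is ported as a
-- total read with an unreachable default.  Each while-loop is ported with a fuel counter that
-- only makes it total; the lemmas below prove the fuel used is never exhausted.
def pvGetI (arr : List Int) (i : Int) : Int := (PySem.List.pyGet? arr i).getD 0

-- `while suffix > 0 and arr[suffix] >= arr[suffix-1]: suffix -= 1`
def pvFindSuffix (arr : List Int) : Nat → Int → Int
  | 0, s => s
  | fuel + 1, s =>
    if 0 < s ∧ pvGetI arr s ≥ pvGetI arr (s - 1) then pvFindSuffix arr fuel (s - 1) else s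

-- inner `while suffix < len(arr) and arr[prefix] > arr[suffix]: suffix += 1`  (x = arr[prefix])
def pvAdvance (arr : List Int) (x : Int) : Nat → Int → Int
  | 0, s => s
  | fuel + 1, s =>
    if s < (arr.length : Int) ∧ x > pvGetI arr s then pvAdvance arr x fuel (s + 1) else s

-- outer `while prefix < suffix and (prefix == 0 or arr[prefix-1] <= arr[prefix]): …`
def pvOuter (arr : List Int) : Nat → Int → Int → Int → Int
  | 0, _, _, ans => ans
  | fuel + 1, p, s, ans =>
    if p < s ∧ (p = 0 ∨ pvGetI arr (p - 1) ≤ pvGetI arr p) then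
      let s' := pvAdvance arr (pvGetI arr p) (arr.length + 1) s
      pvOuter arr fuel (p + 1) s' (min ans (s' - p - 1))
    else ans

def findLengthOfShortestSubarray (arr : List Int) : Int :=
  let s0 := pvFindSuffix arr arr.length ((arr.length : Int) - 1)
  pvOuter arr (arr.length + 1) 0 s0 s0

-- ===== PORT B =====
def pvGetN (arr : List Int) (i : Nat) : Int := arr.getD i 0

-- `while right > 0 and arr[right-1] <= arr[right]: right -= 1`
def pvRightLoop (arr : List Int) : Nat → Nat
  | 0 => 0
  | r + 1 => if pvGetN arr r ≤ pvGetN arr (r + 1) then pvRightLoop arr r else r + 1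

-- `while left + 1 < n and arr[left] <= arr[left+1]: left += 1`; `rem` counts `n - 1 - left`
def pvLeftLoop (arr : List Int) : Nat → Nat → Nat
  | 0, l => l
  | rem + 1, l => if pvGetN arr l ≤ pvGetN arr (l + 1) then pvLeftLoop arr rem (l + 1) else l

def findLengthOfShortestSubarray_alt (arr : List Int) : Int :=
  let n := arr.length
  if n = 0 then 0
  else
    let right := pvRightLoop arr (n - 1)
    if right = 0 then 0
    else
      let left := pvLeftLoop arr (n - 1) 0
      let suffix := PySem.List.slice arr (some (right : Int))
      let ans0 : Int := min ((n : Int) - (left : Int) - 1) (right : Int)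
      (List.range (left + 1)).foldl
        (fun ans i =>
          min ans (((right + PySem.List.bisectLeft suffix (pvGetN arr i) : Nat) : Int) - (i : Int) - 1))
        ans0

-- ===== PRECONDITION & SPEC =====
-- On the empty list A returns -1 (its suffix pointer starts at len(arr)-1 = -1 and is returned
-- unchanged), while B returns 0, the intended value: an empty array is already sorted and a
-- length cannot be negative.
def D_findLengthOfShortestSubarray (arr : List Int) : Prop := arr = []
instance (arr : List Int) : Decidable (D_findLengthOfShortestSubarray arr) := by
  unfold D_findLengthOfShortestSubarray; infer_instance

def Spec_findLengthOfShortestSubarray (arr : List Int) (out : Int) : Prop :=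
  ¬ D_findLengthOfShortestSubarray arr → out = findLengthOfShortestSubarray_alt arr
instance (arr : List Int) (out : Int) : Decidable (Spec_findLengthOfShortestSubarray arr out) := by
  unfold Spec_findLengthOfShortestSubarray; infer_instance

def pvDiffWitness_findLengthOfShortestSubarray : List Int := []
def pvDiffWitnessOut_findLengthOfShortestSubarray : Int × Int := (-1, 0)

-- ===== CLAIM (what is proved, stated in full; the proofs are below) =====
def Claim_unchanged_findLengthOfShortestSubarray : Prop :=
  ∀ (arr : List Int), Dom_findLengthOfShortestSubarray arr →
    Spec_findLengthOfShortestSubarray arr (findLengthOfShortestSubarray arr)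
def Claim_changed_findLengthOfShortestSubarray : Prop :=
  Dom_findLengthOfShortestSubarray (pvDiffWitness_findLengthOfShortestSubarray) ∧
  D_findLengthOfShortestSubarray (pvDiffWitness_findLengthOfShortestSubarray) ∧
  findLengthOfShortestSubarray (pvDiffWitness_findLengthOfShortestSubarray) =
    pvDiffWitnessOut_findLengthOfShortestSubarray.1 ∧
  findLengthOfShortestSubarray_alt (pvDiffWitness_findLengthOfShortestSubarray) =
    pvDiffWitnessOut_findLengthOfShortestSubarray.2 ∧
  pvDiffWitnessOut_findLengthOfShortestSubarray.1 ≠ pvDiffWitnessOut_findLengthOfShortestSubarray.2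
def Claim_exact_findLengthOfShortestSubarray : Prop :=
  ∀ (arr : List Int), Dom_findLengthOfShortestSubarray arr →
    D_findLengthOfShortestSubarray arr →
    findLengthOfShortestSubarray arr ≠ findLengthOfShortestSubarray_alt arr

-- ===== LEMMAS AND PROOFS =====

theorem pvGetI_natCast (arr : List Int) (i : Nat) : pvGetI arr (i : Int) = pvGetN arr i := by
  simp [pvGetI, pvGetN, PySem.List.pyGet?_natCast, List.getD_eq_getElem?_getD]

theorem pvGetN_eq_getElem (arr : List Int) (i : Nat) (h : i < arr.length) :
    pvGetN arr i = arr[i] := by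
  simp [pvGetN, List.getD_eq_getElem?_getD, h]

theorem pvFindSuffix_eq_pvRightLoop (arr : List Int) (k : Nat) :
    ∀ fuel, k ≤ fuel → pvFindSuffix arr fuel (k : Int) = (pvRightLoop arr k : Int) := by
  induction k with
  | zero =>
    intro fuel _
    cases fuel with
    | zero => simp [pvFindSuffix, pvRightLoop]
    | succ f => rw [pvFindSuffix, if_neg (by norm_num)]; simp [pvRightLoop]
  | succ k ih =>
    intro fuel hf
    obtain ⟨f, rfl⟩ : ∃ f, fuel = f + 1 := ⟨fuel - 1, by omega⟩
    have e1 : ((k + 1 : Nat) : Int) - 1 = (k : Int) := by push_cast; ring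
    have hg : pvGetI arr ((k + 1 : Nat) : Int) = pvGetN arr (k + 1) := pvGetI_natCast arr (k + 1)
    have hg2 : pvGetI arr (((k + 1 : Nat) : Int) - 1) = pvGetN arr k := by
      rw [e1, pvGetI_natCast]
    rw [pvFindSuffix]
    by_cases hc : pvGetN arr k ≤ pvGetN arr (k + 1)
    · rw [if_pos ⟨by push_cast; omega, by rw [hg, hg2]; exact hc⟩]
      rw [e1, ih f (by omega), pvRightLoop, if_pos hc]
    · rw [if_neg (fun hcon => hc (by rw [hg, hg2] at hcon; exact hcon.2))]
      rw [pvRightLoop, if_neg hc]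

theorem pvRightLoop_le (arr : List Int) (k : Nat) : pvRightLoop arr k ≤ k := by
  induction k with
  | zero => simp [pvRightLoop]
  | succ k ih => rw [pvRightLoop]; split <;> omega

theorem pvRightLoop_sorted (arr : List Int) (k : Nat) :
    ∀ t, pvRightLoop arr k ≤ t → t < k → pvGetN arr t ≤ pvGetN arr (t + 1) := by
  induction k with
  | zero => intro t h1 h2; omega
  | succ k ih =>
    intro t h1 h2
    rw [pvRightLoop] at h1
    by_cases hc : pvGetN arr k ≤ pvGetN arr (k + 1)
    · rw [if_pos hc] at h1
      rcases Nat.lt_or_ge t k with h | h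
      · exact ih t h1 h
      · have : t = k := by omega
        subst this; exact hc
    · rw [if_neg hc] at h1; omega

theorem pvRightLoop_stop (arr : List Int) (k : Nat) (h : 0 < pvRightLoop arr k) :
    ¬ pvGetN arr (pvRightLoop arr k - 1) ≤ pvGetN arr (pvRightLoop arr k) := by
  induction k with
  | zero => simp [pvRightLoop] at h
  | succ k ih =>
    rw [pvRightLoop] at h ⊢
    by_cases hc : pvGetN arr k ≤ pvGetN arr (k + 1)
    · rw [if_pos hc] at h ⊢; exact ih h
    · rw [if_neg hc] at h ⊢; simpa using hc

theorem pvLeftLoop_bounds (arr : List Int) (rem l : Nat) :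
    l ≤ pvLeftLoop arr rem l ∧ pvLeftLoop arr rem l ≤ l + rem := by
  induction rem generalizing l with
  | zero => simp [pvLeftLoop]
  | succ rem ih =>
    rw [pvLeftLoop]
    split
    · have := ih (l + 1); omega
    · omega

theorem pvLeftLoop_sorted (arr : List Int) (rem l : Nat) :
    ∀ t, l ≤ t → t < pvLeftLoop arr rem l → pvGetN arr t ≤ pvGetN arr (t + 1) := by
  induction rem generalizing l with
  | zero => intro t h1 h2; rw [pvLeftLoop] at h2; omega
  | succ rem ih =>
    intro t h1 h2
    rw [pvLeftLoop] at h2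
    by_cases hc : pvGetN arr l ≤ pvGetN arr (l + 1)
    · rw [if_pos hc] at h2
      rcases Nat.lt_or_ge l t with h | h
      · exact ih (l + 1) t (by omega) h2
      · have : t = l := by omega
        subst this; exact hc
    · rw [if_neg hc] at h2; omega

theorem pvLeftLoop_stop (arr : List Int) (rem l : Nat)
    (h : pvLeftLoop arr rem l < l + rem) :
    ¬ pvGetN arr (pvLeftLoop arr rem l) ≤ pvGetN arr (pvLeftLoop arr rem l + 1) := by
  induction rem generalizing l with
  | zero => rw [pvLeftLoop] at h; omega
  | succ rem ih =>
    rw [pvLeftLoop] at h ⊢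
    by_cases hc : pvGetN arr l ≤ pvGetN arr (l + 1)
    · rw [if_pos hc] at h ⊢
      exact ih (l + 1) (by omega)
    · rw [if_neg hc] at h ⊢; exact hc

-- adjacent sortedness of the tail extends to any two positions
theorem tail_mono (arr : List Int) (r : Nat)
    (hsort : ∀ t, r ≤ t → t + 1 < arr.length → pvGetN arr t ≤ pvGetN arr (t + 1)) :
    ∀ t u, r ≤ t → t ≤ u → u < arr.length → pvGetN arr t ≤ pvGetN arr u := by
  intro t u ht htu hu
  induction u with
  | zero => have : t = 0 := by omega
            subst this; exact le_refl _
  | succ u ih =>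
    rcases Nat.lt_or_ge t (u + 1) with h | h
    · have h1 : pvGetN arr t ≤ pvGetN arr u := ih (by omega) (by omega)
      have h2 : pvGetN arr u ≤ pvGetN arr (u + 1) := by
        apply hsort <;> omega
      omega
    · have : t = u + 1 := by omega
      subst this; exact le_refl _

theorem pvAdvance_post (arr : List Int) (x : Int) :
    ∀ fuel (s : Int), ((arr.length : Int) - s).toNat < fuel →
    s ≤ pvAdvance arr x fuel s ∧ pvAdvance arr x fuel s ≤ max s (arr.length : Int) ∧
      (∀ t : Int, s ≤ t → t < pvAdvance arr x fuel s → pvGetI arr t < x) ∧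
      (pvAdvance arr x fuel s < (arr.length : Int) → x ≤ pvGetI arr (pvAdvance arr x fuel s)) := by
  intro fuel
  induction fuel with
  | zero => intro s hf; omega
  | succ f ih =>
    intro s hf
    rw [pvAdvance]
    by_cases hc : s < (arr.length : Int) ∧ x > pvGetI arr s
    · rw [if_pos hc]
      obtain ⟨ih1, ih2, ih3, ih4⟩ := ih (s + 1) (by omega)
      refine ⟨by omega, by omega, ?_, ih4⟩
      intro t h1 h2
      rcases eq_or_lt_of_le h1 with rfl | h3
      · exact hc.2
      · exact ih3 t (by omega) h2
    · rw [if_neg hc]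
      refine ⟨le_refl _, by omega, by omega, ?_⟩
      intro h1
      by_contra hcon
      exact hc ⟨h1, by omega⟩

-- the pairwise order of the suffix slice, from the right-loop's adjacent sortedness
theorem suffix_pairwise (arr : List Int) (r : Nat)
    (hsort : ∀ t, r ≤ t → t + 1 < arr.length → pvGetN arr t ≤ pvGetN arr (t + 1)) :
    List.Pairwise (fun a b : Int => a ≤ b) (arr.drop r) := by
  rw [List.pairwise_iff_getElem]
  intro i j hi hj hij
  rw [List.getElem_drop, List.getElem_drop]
  have hlen : (arr.drop r).length = arr.length - r := by simp
  have h1 : pvGetN arr (r + i) ≤ pvGetN arr (r + j) :=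
    tail_mono arr r hsort (r + i) (r + j) (by omega) (by omega) (by omega)
  rw [← pvGetN_eq_getElem arr (r + i) (by omega), ← pvGetN_eq_getElem arr (r + j) (by omega)]
  exact h1

theorem pvGetI_eq_getN_of_range (arr : List Int) (t : Int) (h0 : 0 ≤ t) :
    pvGetI arr t = pvGetN arr t.toNat := by
  have h1 := pvGetI_natCast arr t.toNat
  rw [show ((t.toNat : Nat) : Int) = t from by omega] at h1
  exact h1

-- the advancing pointer lands exactly at right + bisect_left(suffix, x)
theorem pvAdvance_eq_bisect (arr : List Int) (r : Nat) (x s : Int) (fuel : Nat)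
    (hfuel : ((arr.length : Int) - s).toNat < fuel)
    (hsort : ∀ t, r ≤ t → t + 1 < arr.length → pvGetN arr t ≤ pvGetN arr (t + 1))
    (hrs : (r : Int) ≤ s) (hsn : s ≤ (arr.length : Int))
    (hbelow : ∀ t : Int, (r : Int) ≤ t → t < s → pvGetI arr t < x) :
    pvAdvance arr x fuel s = ((r + PySem.List.bisectLeft (arr.drop r) x : Nat) : Int) := by
  have hpw := suffix_pairwise arr r hsort
  obtain ⟨hb1, hb2, hb3⟩ := PySem.List.bisectLeft_spec (arr.drop r) x hpw
  have hlen : (arr.drop r).length = arr.length - r := by simp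
  set b := PySem.List.bisectLeft (arr.drop r) x with hbdef
  obtain ⟨ha1, ha2, ha3, ha4⟩ := pvAdvance_post arr x fuel s hfuel
  set a := pvAdvance arr x fuel s with hadef
  have hrb_le : r + b ≤ arr.length := by omega
  have han : a ≤ (arr.length : Int) := by omega
  -- every position in [r, a) is < x ; position a (if < n) is ≥ x
  have hAbelow : ∀ t : Int, (r : Int) ≤ t → t < a → pvGetI arr t < x := by
    intro t h1 h2
    rcases lt_or_ge t s with h | h
    · exact hbelow t h1 h
    · exact ha3 t h h2
  -- every position in [r, r+b) is < x ; position r+b (if < n) is ≥ x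
  have hBbelow : ∀ t : Int, (r : Int) ≤ t → t < ((r + b : Nat) : Int) → pvGetI arr t < x := by
    intro t h1 h2
    have h0 : 0 ≤ t := by omega
    rw [pvGetI_eq_getN_of_range arr t h0]
    have hj : t.toNat - r < b := by omega
    have hjlen : t.toNat - r < (arr.drop r).length := by omega
    have := hb2 (t.toNat - r) hjlen hj
    rw [List.getElem_drop] at this
    rw [← pvGetN_eq_getElem arr (r + (t.toNat - r)) (by omega)] at this
    have : pvGetN arr t.toNat < x := by
      have e2 : r + (t.toNat - r) = t.toNat := by omega
      rwa [e2] at this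
    exact this
  have hBat : ((r + b : Nat) : Int) < (arr.length : Int) → x ≤ pvGetI arr ((r + b : Nat) : Int) := by
    intro h
    have hjlen : b < (arr.drop r).length := by omega
    have := hb3 b hjlen (le_refl _)
    rw [List.getElem_drop] at this
    rw [pvGetI_natCast]
    rw [← pvGetN_eq_getElem arr (r + b) (by omega)] at this; exact this
  -- uniqueness of the first position ≥ x
  rcases lt_trichotomy a ((r + b : Nat) : Int) with h | h | h
  · exfalso
    have han' : a < (arr.length : Int) := by omega
    have h1 := ha4 han'
    have h2 := hBbelow a (by omega) h
    omega
  · exact h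
  · exfalso
    have h1 : ((r + b : Nat) : Int) < (arr.length : Int) := by omega
    have h2 := hBat h1
    have h3 := hAbelow ((r + b : Nat) : Int) (by omega) h
    omega

-- ===== the main outer-loop ↔ fold correspondence =====

theorem pvOuter_stop (arr : List Int) (fuel : Nat) (p s ans : Int)
    (h : ¬ (p < s ∧ (p = 0 ∨ pvGetI arr (p - 1) ≤ pvGetI arr p))) :
    pvOuter arr fuel p s ans = ans := by
  cases fuel with
  | zero => rfl
  | succ f => rw [pvOuter, if_neg h]

theorem pvOuter_eq_fold (arr : List Int) (r l : Nat)
    (hsort : ∀ t, r ≤ t → t + 1 < arr.length → pvGetN arr t ≤ pvGetN arr (t + 1))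
    (hpre : ∀ t, t < l → pvGetN arr t ≤ pvGetN arr (t + 1))
    (hstop : ¬ pvGetN arr l ≤ pvGetN arr (l + 1))
    (hlr : l < r) (hrn : r < arr.length) :
    ∀ k (fuel : Nat) i (s : Int) (ans : Int), i + k = l + 1 → i ≤ l → k ≤ fuel →
      (r : Int) ≤ s → s ≤ (arr.length : Int) →
      (∀ t : Int, (r : Int) ≤ t → t < s → pvGetI arr t < pvGetN arr i) →
      pvOuter arr fuel (i : Int) s ans =
        (List.range' i k).foldl
          (fun ans j =>
            min ans (((r + PySem.List.bisectLeft (arr.drop r) (pvGetN arr j) : Nat) : Int) - (j : Int) - 1))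
          ans := by
  intro k
  induction k with
  | zero => intro fuel i s ans hik hil _ _ _ _; omega
  | succ k ih =>
    intro fuel i s ans hik hil hfuel hrs hsn hbelow
    obtain ⟨f, rfl⟩ : ∃ f, fuel = f + 1 := ⟨fuel - 1, by omega⟩
    have hguard : (i : Int) < s ∧ ((i : Int) = 0 ∨ pvGetI arr ((i : Int) - 1) ≤ pvGetI arr (i : Int)) := by
      constructor
      · have : (i : Int) < (r : Int) := by exact_mod_cast (by omega : i < r)
        omega
      · rcases Nat.eq_zero_or_pos i with h | h
        · left; omega
        · right
          have e1 : (i : Int) - 1 = ((i - 1 : Nat) : Int) := by omega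
          rw [e1, pvGetI_natCast, pvGetI_natCast]
          have := hpre (i - 1) (by omega)
          have e2 : i - 1 + 1 = i := by omega
          rwa [e2] at this
    rw [pvOuter, if_pos hguard]
    have hxi : pvGetI arr (i : Int) = pvGetN arr i := pvGetI_natCast arr i
    have hadv : pvAdvance arr (pvGetI arr (i : Int)) (arr.length + 1) s =
        ((r + PySem.List.bisectLeft (arr.drop r) (pvGetN arr i) : Nat) : Int) := by
      rw [hxi]
      exact pvAdvance_eq_bisect arr r (pvGetN arr i) s (arr.length + 1) (by omega) hsort hrs hsn hbelow
    rw [hadv]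
    rw [List.range'_succ]
    simp only [List.foldl_cons]
    set b := PySem.List.bisectLeft (arr.drop r) (pvGetN arr i) with hbdef
    have hpw := suffix_pairwise arr r hsort
    obtain ⟨hb1, hb2, hb3⟩ := PySem.List.bisectLeft_spec (arr.drop r) (pvGetN arr i) hpw
    have hlen : (arr.drop r).length = arr.length - r := by simp
    rcases Nat.eq_zero_or_pos k with hk0 | hkpos
    · -- i = l : one more unfold of pvOuter, whose guard is now false
      subst hk0
      have hil' : i = l := by omega
      subst hil'
      simp only [List.range'_zero, List.foldl_nil]
      have e1 : (i : Int) + 1 = ((i + 1 : Nat) : Int) := by push_cast; ring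
      rw [e1, pvOuter_stop]
      intro hcon
      rcases hcon.2 with h | h
      · omega
      · have e2 : ((i + 1 : Nat) : Int) - 1 = (i : Int) := by push_cast; ring
        rw [e2, pvGetI_natCast, pvGetI_natCast] at h
        exact hstop h
    · -- i < l : recurse
      have e1 : (i : Int) + 1 = ((i + 1 : Nat) : Int) := by push_cast; ring
      rw [e1]
      apply ih f (i + 1) _ _ (by omega) (by omega) (by omega) (by push_cast; omega) (by push_cast; omega)
      intro t h1 h2
      have h0 : 0 ≤ t := by omega
      rw [pvGetI_eq_getN_of_range arr t h0]
      have hj : t.toNat - r < b := by omega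
      have hjlen : t.toNat - r < (arr.drop r).length := by omega
      have hlt := hb2 (t.toNat - r) hjlen hj
      rw [List.getElem_drop] at hlt
      rw [← pvGetN_eq_getElem arr (r + (t.toNat - r)) (by omega)] at hlt
      have e2 : r + (t.toNat - r) = t.toNat := by omega
      rw [e2] at hlt
      have hmono : pvGetN arr i ≤ pvGetN arr (i + 1) := hpre i (by omega)
      omega

-- seeding the fold with an extra dominated candidate does not change its value
theorem fold_min_absorb (arr : List Int) (r l : Nat) (X : Int)
    (hX : ((r + PySem.List.bisectLeft (arr.drop r) (pvGetN arr l) : Nat) : Int) - (l : Int) - 1 ≤ X) :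
    ∀ k i (ans : Int), i + k = l + 1 → i ≤ l →
      (List.range' i k).foldl
          (fun ans j =>
            min ans (((r + PySem.List.bisectLeft (arr.drop r) (pvGetN arr j) : Nat) : Int) - (j : Int) - 1))
          (min ans X) =
      (List.range' i k).foldl
          (fun ans j =>
            min ans (((r + PySem.List.bisectLeft (arr.drop r) (pvGetN arr j) : Nat) : Int) - (j : Int) - 1))
          ans := by
  intro k
  induction k with
  | zero => intro i ans hik hil; omega
  | succ k ih =>
    intro i ans hik hil
    simp only [List.range'_succ, List.foldl_cons]
    rcases Nat.eq_zero_or_pos k with hk0 | hkpos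
    · subst hk0
      have : i = l := by omega
      subst this
      simp only [List.range'_zero, List.foldl_nil]
      omega
    · have e : min (min ans X)
          (((r + PySem.List.bisectLeft (arr.drop r) (pvGetN arr i) : Nat) : Int) - (i : Int) - 1) =
          min (min ans (((r + PySem.List.bisectLeft (arr.drop r) (pvGetN arr i) : Nat) : Int) - (i : Int) - 1)) X := by
        omega
      rw [e]
      exact ih (i + 1) _ (by omega) (by omega)

-- the A-side initial pointer equals the B-side right loop
theorem a_s0_eq (arr : List Int) (h : arr ≠ []) :
    pvFindSuffix arr arr.length ((arr.length : Int) - 1) =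
      ((pvRightLoop arr (arr.length - 1) : Nat) : Int) := by
  have hn : 1 ≤ arr.length := by
    have := List.length_pos_of_ne_nil h; omega
  have e : (arr.length : Int) - 1 = ((arr.length - 1 : Nat) : Int) := by omega
  rw [e, pvFindSuffix_eq_pvRightLoop arr (arr.length - 1) arr.length (by omega)]

theorem main_equiv (arr : List Int) (h : arr ≠ []) :
    findLengthOfShortestSubarray arr = findLengthOfShortestSubarray_alt arr := by
  have hn : 1 ≤ arr.length := by
    have := List.length_pos_of_ne_nil h; omega
  set n := arr.length with hndef
  set r := pvRightLoop arr (n - 1) with hrdef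
  have hs0 : pvFindSuffix arr n ((n : Int) - 1) = (r : Int) := a_s0_eq arr h
  have hrle : r ≤ n - 1 := pvRightLoop_le arr (n - 1)
  unfold findLengthOfShortestSubarray findLengthOfShortestSubarray_alt
  simp only [← hndef, ← hrdef, hs0]
  rw [if_neg (by omega : ¬ n = 0)]
  by_cases hr0 : r = 0
  · rw [if_pos hr0]
    rw [pvOuter_stop arr _ _ _ _ (by rw [hr0]; norm_num)]
    exact_mod_cast hr0
  · rw [if_neg hr0]
    set l := pvLeftLoop arr (n - 1) 0 with hldef
    have hrpos : 0 < r := by omega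
    have hsort : ∀ t, r ≤ t → t + 1 < n → pvGetN arr t ≤ pvGetN arr (t + 1) := by
      intro t h1 h2
      exact pvRightLoop_sorted arr (n - 1) t h1 (by omega)
    have hlb := pvLeftLoop_bounds arr (n - 1) 0
    have hpre : ∀ t, t < l → pvGetN arr t ≤ pvGetN arr (t + 1) := by
      intro t h1
      exact pvLeftLoop_sorted arr (n - 1) 0 t (by omega) h1
    have hrstop := pvRightLoop_stop arr (n - 1) hrpos
    have hlr : l < r := by
      by_contra hcon
      rw [not_lt] at hcon
      have h1 : pvGetN arr (r - 1) ≤ pvGetN arr r := by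
        have := hpre (r - 1) (by omega)
        have e : r - 1 + 1 = r := by omega
        rwa [e] at this
      rw [← hrdef] at hrstop
      exact hrstop h1
    have hstop : ¬ pvGetN arr l ≤ pvGetN arr (l + 1) := by
      have : l < 0 + (n - 1) := by omega
      exact pvLeftLoop_stop arr (n - 1) 0 this
    have hslice : PySem.List.slice arr (some (r : Int)) = arr.drop r := by
      rw [PySem.List.slice_from arr (by omega : (0:Int) ≤ (r : Int))]
      simp
    rw [hslice]
    have hmain := pvOuter_eq_fold arr r l hsort hpre hstop hlr (by omega)
      (l + 1) (n + 1) 0 (r : Int) (r : Int) (by omega) (by omega) (by omega) (by omega)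
      (by exact_mod_cast (by omega : r ≤ n)) (by intro t h1 h2; omega)
    simp only [Nat.cast_zero] at hmain
    rw [List.range_eq_range']
    rw [hmain]
    -- absorb the extra seed candidate n - l - 1
    have hpw := suffix_pairwise arr r hsort
    obtain ⟨hb1, _, _⟩ := PySem.List.bisectLeft_spec (arr.drop r) (pvGetN arr l) hpw
    have hlen : (arr.drop r).length = n - r := by simp [hndef]
    have hX : ((r + PySem.List.bisectLeft (arr.drop r) (pvGetN arr l) : Nat) : Int) - (l : Int) - 1 ≤
        (n : Int) - (l : Int) - 1 := by
      have : r + PySem.List.bisectLeft (arr.drop r) (pvGetN arr l) ≤ n := by omega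
      omega
    have habs := fold_min_absorb arr r l ((n : Int) - (l : Int) - 1) hX (l + 1) 0 (r : Int) (by omega) (by omega)
    have e : min ((n : Int) - (l : Int) - 1) (r : Int) = min ((r : Int)) ((n : Int) - (l : Int) - 1) := by
      omega
    rw [e]
    exact habs.symm

theorem a_empty : findLengthOfShortestSubarray [] = -1 := by decide

-- ===== VERDICT (by name: the statement is the Claim_ definition above) =====
theorem findLengthOfShortestSubarray_spec : Claim_unchanged_findLengthOfShortestSubarray := by
  intro arr _ hD
  exact main_equiv arr hD

theorem findLengthOfShortestSubarray_changed : Claim_changed_findLengthOfShortestSubarray := by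
  unfold Claim_changed_findLengthOfShortestSubarray
  refine ⟨by decide, rfl, a_empty, by decide, by decide⟩

theorem findLengthOfShortestSubarray_tight : Claim_exact_findLengthOfShortestSubarray := by
  intro arr _ hD
  rw [hD, a_empty]
  decide
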